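-- pv_equiv track=rewrite | github.com/rmoehn/amplification | amplification/tasks/sat.py | alternating_sequences
-- ===== SOURCE A (Python) =====
-- def alternating_sequences(alphabet1, alphabet2, length):
--     if length == 0:
--         return [[]]
--     L = []
--     for a in alphabet1:
--         for b in alphabet2:
--             L.extend([[a, b] + L for L in alternating_sequences(
--                 alphabet1, alphabet2, length - 1)])
--     return L
-- ===== SOURCE B (Python) =====
-- def alternating_sequences(alphabet1, alphabet2, length):
--     pairs = [[a, b] for a in alphabet1 for b in alphabet2]
--     result = [[]]
--     for _ in range(length):
--         result = [p + s for p in pairs for s in result]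
--     return result
-- ===== Notes on version B (the rewrite author's own statement) =====
-- stated objective: idiomatic
-- what changed: B precomputes the pair list once and builds the result iteratively by repeated flat products over range(length), instead of A's recursion that re-runs the full recursive call once per (a,b) pair at every level.
-- outside the precondition, e.g. on alternating_sequences([], [0, 7], -1): A returns [], B returns [[]]
import Mathlib
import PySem

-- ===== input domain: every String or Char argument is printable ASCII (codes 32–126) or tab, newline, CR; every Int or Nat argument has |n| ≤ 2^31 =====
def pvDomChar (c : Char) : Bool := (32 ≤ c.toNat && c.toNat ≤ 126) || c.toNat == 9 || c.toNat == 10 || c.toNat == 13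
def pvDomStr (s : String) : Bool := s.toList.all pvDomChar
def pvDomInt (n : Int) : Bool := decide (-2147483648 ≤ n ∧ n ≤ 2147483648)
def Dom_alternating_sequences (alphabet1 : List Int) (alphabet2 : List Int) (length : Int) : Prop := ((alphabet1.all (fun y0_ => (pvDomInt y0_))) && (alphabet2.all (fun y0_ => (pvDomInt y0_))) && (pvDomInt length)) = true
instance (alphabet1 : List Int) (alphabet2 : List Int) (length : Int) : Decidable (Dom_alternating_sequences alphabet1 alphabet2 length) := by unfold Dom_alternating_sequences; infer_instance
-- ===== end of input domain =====

-- ===== PORT A =====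
-- B precomputes the pair list once and builds the result iteratively (repeated flat
-- products), instead of A's recursion that re-runs the recursive call per (a,b) pair.
-- Fuel helper: A's recursion on `length`, counted down as a Nat (faithful for length ≥ 0).
def asA (alphabet1 : List Int) (alphabet2 : List Int) : Nat → List (List Int)
  | 0 => [[]]
  | n + 1 =>
    alphabet1.foldl (fun L a =>
      alphabet2.foldl (fun L b =>
        L ++ ((asA alphabet1 alphabet2 n).map (fun t => [a, b] ++ t))) L) []

def alternating_sequences (alphabet1 : List Int) (alphabet2 : List Int) (length : Int) : List (List Int) :=
  asA alphabet1 alphabet2 length.toNat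

-- ===== PORT B =====
def alternating_sequences_alt (alphabet1 : List Int) (alphabet2 : List Int) (length : Int) : List (List Int) :=
  let pairs := alphabet1.flatMap (fun a => alphabet2.map (fun b => [a, b]))
  (PySem.List.pyRange 0 length 1).foldl
    (fun result _ => pairs.flatMap (fun p => result.map (fun s => p ++ s))) [[]]

-- ===== PRECONDITION & SPEC =====
-- Pre_ excludes negative length, outside the function's natural domain: there A raises
-- RecursionError whenever both alphabets are nonempty, and returns [] (leftover of the
-- empty loop) when one alphabet is empty, while B's range(length) is empty so B returns [[]].
def Pre_alternating_sequences (alphabet1 : List Int) (alphabet2 : List Int) (length : Int) : Prop :=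
  0 ≤ length
instance (alphabet1 : List Int) (alphabet2 : List Int) (length : Int) : Decidable (Pre_alternating_sequences alphabet1 alphabet2 length) := by unfold Pre_alternating_sequences; infer_instance
def pvWitness_alternating_sequences : List Int × List Int × Int := ([1, 2], [3], 2)

def Spec_alternating_sequences (alphabet1 : List Int) (alphabet2 : List Int) (length : Int) (out : List (List Int)) : Prop := out = alternating_sequences_alt alphabet1 alphabet2 length
instance (alphabet1 : List Int) (alphabet2 : List Int) (length : Int) (out : List (List Int)) : Decidable (Spec_alternating_sequences alphabet1 alphabet2 length out) := by unfold Spec_alternating_sequences; infer_instance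

-- ===== CLAIM (what is proved, stated in full; the proofs are below) =====
def Claim_equal_alternating_sequences : Prop := ∀ (alphabet1 : List Int) (alphabet2 : List Int) (length : Int), Dom_alternating_sequences alphabet1 alphabet2 length → Pre_alternating_sequences alphabet1 alphabet2 length → Spec_alternating_sequences alphabet1 alphabet2 length (alternating_sequences alphabet1 alphabet2 length)

-- ===== LEMMAS AND PROOFS =====
-- Inner loop of A: folding over alphabet2 appends the maps in order.
theorem asA_inner (a2 : List Int) (a : Int) (X : List (List Int)) (acc : List (List Int)) :
    a2.foldl (fun L b => L ++ (X.map (fun t => [a, b] ++ t))) acc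
      = acc ++ a2.flatMap (fun b => X.map (fun t => [a, b] ++ t)) := by
  induction a2 generalizing acc with
  | nil => simp
  | cons b bs ih =>
    rw [List.foldl_cons, ih]
    simp [List.flatMap_cons, List.flatMap, List.append_assoc]

-- Outer loop of A equals one iteration step of B.
theorem asA_step (a1 a2 : List Int) (X : List (List Int)) (acc : List (List Int)) :
    a1.foldl (fun L a =>
        a2.foldl (fun L b => L ++ (X.map (fun t => [a, b] ++ t))) L) acc
      = acc ++ (a1.flatMap (fun a => a2.map (fun b => [a, b]))).flatMap
          (fun p => X.map (fun s => p ++ s)) := by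
  induction a1 generalizing acc with
  | nil => simp
  | cons a as ih =>
    rw [List.foldl_cons, asA_inner, ih]
    simp [List.flatMap_cons, List.flatMap_map, List.append_assoc]

theorem asA_eq_iter (a1 a2 : List Int) (n : Nat) :
    (PySem.List.pyRange 0 (n : Int) 1).foldl
      (fun result _ =>
        (a1.flatMap (fun a => a2.map (fun b => [a, b]))).flatMap
          (fun p => result.map (fun s => p ++ s))) [[]]
      = asA a1 a2 n := by
  induction n with
  | zero => simp [asA]
  | succ n ih =>
    have h : PySem.List.pyRange 0 ((n : Int) + 1) 1
        = PySem.List.pyRange 0 (n : Int) 1 ++ [(n : Int)] :=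
      PySem.List.pyRange_one_succ_right (by exact_mod_cast Nat.zero_le n)
    push_cast
    rw [h, List.foldl_append, ih]
    simp only [List.foldl_cons, List.foldl_nil, asA]
    rw [asA_step]
    simp

-- ===== VERDICT (by name: the statement is the Claim_ definition above) =====
theorem alternating_sequences_spec : Claim_equal_alternating_sequences := by
  intro a1 a2 length _ hpre
  unfold Spec_alternating_sequences alternating_sequences alternating_sequences_alt
  have hlen : length = (length.toNat : Int) := (Int.toNat_of_nonneg hpre).symm
  rw [hlen]
  exact (asA_eq_iter a1 a2 length.toNat).symm
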